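-- pv_equiv track=rewrite | github.com/NLP-CISUC/TECo | teco_main.py | dict_forms_to_lemmas_label
-- ===== SOURCE A (Python) =====
-- def dict_forms_to_lemmas_label(dict_forms_labels):
--     dict_lemmas_labels = {}
--     for form in dict_forms_labels:
--         for entry in dict_forms_labels[form]:
--             if entry[1] not in dict_lemmas_labels:
--                 dict_lemmas_labels[entry[1]] = []
--             dict_lemmas_labels[entry[1]].append(entry)
--     return dict_lemmas_labels
-- ===== SOURCE B (Python) =====
-- def dict_forms_to_lemmas_label(dict_forms_labels):
--     flat = [e for form in dict_forms_labels for e in dict_forms_labels[form]]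
--     keys = list(dict.fromkeys(e[1] for e in flat))
--     return {k: [e for e in flat if e[1] == k] for k in keys}
-- ===== Notes on version B (the rewrite author's own statement) =====
-- stated objective: alternative
-- what changed: Replaces the incremental dict-bucketing loop by a flatten-all-entries comprehension, an ordered dedup of the lemma keys (dict.fromkeys), and one filter comprehension per key.
import Mathlib
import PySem

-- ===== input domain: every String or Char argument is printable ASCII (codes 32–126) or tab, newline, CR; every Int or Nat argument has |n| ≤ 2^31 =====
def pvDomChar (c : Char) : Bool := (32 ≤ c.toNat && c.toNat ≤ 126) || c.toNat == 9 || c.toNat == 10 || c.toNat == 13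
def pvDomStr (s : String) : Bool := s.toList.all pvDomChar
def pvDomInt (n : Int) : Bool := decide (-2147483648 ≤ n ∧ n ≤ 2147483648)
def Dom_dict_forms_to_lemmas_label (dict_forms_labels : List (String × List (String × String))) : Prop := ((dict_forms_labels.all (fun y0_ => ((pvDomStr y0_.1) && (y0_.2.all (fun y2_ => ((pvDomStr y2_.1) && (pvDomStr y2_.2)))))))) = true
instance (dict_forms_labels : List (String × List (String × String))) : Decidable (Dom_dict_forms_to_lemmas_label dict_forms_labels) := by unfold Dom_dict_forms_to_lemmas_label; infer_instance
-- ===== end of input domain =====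

-- B replaces A's incremental dict-bucketing by flatten + ordered dedup of lemma keys + one filter per key: an alternative decomposition, not claimed faster.


-- ===== PORT A =====
-- for form in d: for entry in d[form]: bucket entry under entry[1] (d.modify k [] (·++[e]) is exactly
-- "if k not in dict: dict[k]=[]; dict[k].append(e)"); the input dict is iterated as its (key, value) items.
def dict_forms_to_lemmas_label (dict_forms_labels : List (String × List (String × String))) : List (String × List (String × String)) :=
  (dict_forms_labels.foldl
    (fun acc p =>
      p.2.foldl (fun acc2 e => acc2.modify e.2 [] (fun l => l ++ [e])) acc)
    (PySem.Dict.empty : PySem.Dict String (List (String × String)))).items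

-- ===== PORT B =====
def dict_forms_to_lemmas_label_alt (dict_forms_labels : List (String × List (String × String))) : List (String × List (String × String)) :=
  let flat := dict_forms_labels.flatMap (fun p => p.2)
  let keys := PySem.List.dedup (flat.map (fun e => e.2))
  keys.map (fun k => (k, flat.filter (fun e => e.2 == k)))

-- ===== PRECONDITION & SPEC =====
def Spec_dict_forms_to_lemmas_label (dict_forms_labels : List (String × List (String × String))) (out : List (String × List (String × String))) : Prop := out = dict_forms_to_lemmas_label_alt dict_forms_labels
instance (dict_forms_labels : List (String × List (String × String))) (out : List (String × List (String × String))) : Decidable (Spec_dict_forms_to_lemmas_label dict_forms_labels out) := by unfold Spec_dict_forms_to_lemmas_label; infer_instance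

-- ===== CLAIM (what is proved, stated in full; the proofs are below) =====
def Claim_equal_dict_forms_to_lemmas_label : Prop := ∀ (dict_forms_labels : List (String × List (String × String))), Dom_dict_forms_to_lemmas_label dict_forms_labels → Spec_dict_forms_to_lemmas_label dict_forms_labels (dict_forms_to_lemmas_label dict_forms_labels)

-- ===== LEMMAS AND PROOFS =====

-- A's nested loop is the same fold over the flattened entry list.
theorem foldl_nested_eq_flat (d : List (String × List (String × String)))
    (acc : PySem.Dict String (List (String × String))) :
    d.foldl (fun acc p =>
        p.2.foldl (fun acc2 e => acc2.modify e.2 [] (fun l => l ++ [e])) acc) acc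
      = (d.flatMap (fun p => p.2)).foldl
          (fun acc2 e => acc2.modify e.2 [] (fun l => l ++ [e])) acc := by
  induction d generalizing acc with
  | nil => rfl
  | cons p t ih => simp [List.flatMap_cons, List.foldl_append, ih]

-- The bucket at key k after A's loop is the filter of the processed entries.
theorem getD_bucket_loop (l : List (String × String))
    (dd : PySem.Dict String (List (String × String))) (k : String) :
    (l.foldl (fun acc2 e => acc2.modify e.2 [] (fun l' => l' ++ [e])) dd).getD k []
      = dd.getD k [] ++ l.filter (fun e => e.2 == k) := by
  induction l generalizing dd with
  | nil => simp
  | cons e t ih =>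
      simp only [List.foldl_cons, ih, List.filter_cons]
      rw [PySem.Dict.getD_modify]
      by_cases h : e.2 = k
      · subst h; simp
      · simp [h, Ne.symm h, beq_iff_eq]

theorem dict_forms_to_lemmas_label_eq (d : List (String × List (String × String))) :
    dict_forms_to_lemmas_label d = dict_forms_to_lemmas_label_alt d := by
  unfold dict_forms_to_lemmas_label dict_forms_to_lemmas_label_alt
  rw [foldl_nested_eq_flat]
  set flat := d.flatMap (fun p => p.2) with hflat
  have hkeys :
      ((flat.foldl (fun acc2 e => acc2.modify e.2 [] (fun l => l ++ [e]))
          (PySem.Dict.empty : PySem.Dict String (List (String × String)))).keys)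
        = PySem.Set.ofList (flat.map (fun e => e.2)) := by
    rw [PySem.Dict.keys_foldl_modify_key flat (fun e => e.2) [] (fun _ e => (fun l => l ++ [e]))]
    simp [PySem.Dict.keys_empty, PySem.Set.update, PySem.Set.ofList]
  have hnd :
      ((flat.foldl (fun acc2 e => acc2.modify e.2 [] (fun l => l ++ [e]))
          (PySem.Dict.empty : PySem.Dict String (List (String × String)))).keys).Nodup := by
    exact PySem.Dict.nodup_keys_foldl_modify_key flat (fun e => e.2) []
      (fun _ e => (fun l => l ++ [e])) _ (by simp [PySem.Dict.keys_empty])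
  rw [PySem.Dict.items_eq_map_keys _ hnd ([] : List (String × String))]
  dsimp only
  rw [hkeys, PySem.List.dedup_eq_ofList]
  apply List.map_congr_left
  intro k _
  rw [getD_bucket_loop]
  simp

-- ===== VERDICT (by name: the statement is the Claim_ definition above) =====
theorem dict_forms_to_lemmas_label_spec : Claim_equal_dict_forms_to_lemmas_label := by
  intro d _
  unfold Spec_dict_forms_to_lemmas_label
  exact dict_forms_to_lemmas_label_eq d
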